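-- pv_equiv track=rewrite | github.com/symikelee/demonstration_based_xAI_study | simple_game_test/utils.py | str_to_rules
-- ===== SOURCE A (Python) =====
-- def str_to_rules(rule_str):
--     bin_strs = rule_str.split("bin:")
--     rules = []
--     for bin_ind, bin_str in enumerate(bin_strs[1:]):
--         rule_strs = bin_str.split("rule;")
--         rules.append([])
--         for rule_ind, rule_str in enumerate(rule_strs[1:]):
--             prop_strs = rule_str.split("prop-")
--             rules[bin_ind].append([])
--             for prop_str in prop_strs[1:]:
--                 tmp_strs = prop_str.replace('[', '').replace(']',
--                                                             '').replace("'", '')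
--                 rules[bin_ind][rule_ind].append(tmp_strs.split(', '))
--     return rules
-- ===== SOURCE B (Python) =====
-- def str_to_rules(rule_str):
--     def parse(s, delims):
--         if not delims:
--             return s.replace('[', '').replace(']', '').replace("'", '').split(', ')
--         return [parse(frag, delims[1:]) for frag in s.split(delims[0])[1:]]
--     return parse(rule_str, ['bin:', 'rule;', 'prop-'])
-- ===== Notes on version B (the rewrite author's own statement) =====
-- stated objective: simpler
-- what changed: Replaces the three hand-unrolled nested loops that mutate rules[bin_ind][rule_ind] by index with one recursive parse(s, delims) over the delimiter hierarchy ['bin:','rule;','prop-'], mapping over the fragments after the first.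
import Mathlib
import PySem

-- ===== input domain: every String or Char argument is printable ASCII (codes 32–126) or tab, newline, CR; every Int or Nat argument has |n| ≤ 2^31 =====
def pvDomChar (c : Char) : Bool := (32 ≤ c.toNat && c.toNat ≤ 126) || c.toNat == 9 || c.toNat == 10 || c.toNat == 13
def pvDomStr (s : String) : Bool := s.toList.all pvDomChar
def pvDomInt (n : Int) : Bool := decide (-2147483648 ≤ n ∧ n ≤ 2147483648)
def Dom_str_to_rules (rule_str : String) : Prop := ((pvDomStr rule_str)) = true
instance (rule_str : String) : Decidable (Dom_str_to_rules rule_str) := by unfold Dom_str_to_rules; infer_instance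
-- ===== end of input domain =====

-- B replaces A's three hand-unrolled index-mutating loops by one recursive parse over the delimiter hierarchy (objective: simpler).

-- s.split(sep) with a nonempty literal sep: exact via PySem.Chars.splitOn
def pySplit (s sep : String) : List String :=
  (PySem.Chars.splitOn s.toList sep.toList).map String.mk

-- ===== PORT A =====
-- literal transliteration: enumerate-indexed nested loops mutating rules[bin_ind][rule_ind],
-- mutation rendered as List.set/getD at the (always in-range, nonnegative) Python index.
def str_to_rules (rule_str : String) : List (List (List (List String))) :=
  let bin_strs := pySplit rule_str "bin:"
  let rules : List (List (List (List String))) := []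
  (PySem.List.enumerate (PySem.List.slice bin_strs (some 1) none)).foldl
    (fun rules bp =>
      let bin_ind := bp.1
      let bin_str := bp.2
      let rule_strs := pySplit bin_str "rule;"
      let rules := rules ++ [[]]
      (PySem.List.enumerate (PySem.List.slice rule_strs (some 1) none)).foldl
        (fun rules rp =>
          let rule_ind := rp.1
          let rule_str := rp.2
          let prop_strs := pySplit rule_str "prop-"
          let rules := rules.set bin_ind.toNat ((rules.getD bin_ind.toNat []) ++ [[]])
          (PySem.List.slice prop_strs (some 1) none).foldl
            (fun rules prop_str =>
              let tmp_strs := PySem.Str.replace (PySem.Str.replace (PySem.Str.replace prop_str "[" "") "]" "") "'" ""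
              rules.set bin_ind.toNat ((rules.getD bin_ind.toNat []).set rule_ind.toNat
                (((rules.getD bin_ind.toNat []).getD rule_ind.toNat []) ++ [pySplit tmp_strs ", "])))
            rules)
        rules)
    rules

-- ===== PORT B =====
-- parse's base case: the cleanup + split on ', '
def parseLeaf (s : String) : List String :=
  pySplit (PySem.Str.replace (PySem.Str.replace (PySem.Str.replace s "[" "") "]" "") "'" "") ", "

-- one level of parse: split on the delimiter, drop the first fragment ([1:] = drop 1, exact), recurse on the rest.
-- Source B's recursion on the delims list is unrolled by depth here because each level has a different Lean result type.
def parseLevel {α : Type} (delim : String) (rec : String → α) (s : String) : List α :=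
  ((pySplit s delim).drop 1).map rec

def str_to_rules_alt (rule_str : String) : List (List (List (List String))) :=
  parseLevel "bin:" (parseLevel "rule;" (parseLevel "prop-" parseLeaf)) rule_str

-- ===== PRECONDITION & SPEC =====
def Spec_str_to_rules (rule_str : String) (out : List (List (List (List String)))) : Prop := out = str_to_rules_alt rule_str
instance (rule_str : String) (out : List (List (List (List String)))) : Decidable (Spec_str_to_rules rule_str out) := by unfold Spec_str_to_rules; infer_instance

-- ===== CLAIM (what is proved, stated in full; the proofs are below) =====
def Claim_equal_str_to_rules : Prop := ∀ (rule_str : String), Dom_str_to_rules rule_str → Spec_str_to_rules rule_str (str_to_rules rule_str)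

-- ===== LEMMAS AND PROOFS =====

-- a fold whose every step only rewrites bucket `bi` commutes with extracting that bucket
theorem pv_foldl_set_bucket {α γ : Type} (g : γ → α → γ) (bi : Nat) (d : γ) :
    ∀ (ps : List α) (rules : List γ),
      ps.foldl (fun rs p => rs.set bi (g (rs.getD bi d) p)) rules
        = rules.set bi (ps.foldl g (rules.getD bi d)) := by
  intro ps
  induction ps with
  | nil =>
    intro rules
    by_cases h : bi < rules.length
    · simp [List.getD_eq_getElem?_getD, List.getElem?_eq_getElem h]
    · simp [List.set_eq_of_length_le (Nat.le_of_not_lt h)]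
  | cons p ps ih =>
    intro rules
    simp only [List.foldl_cons, ih]
    by_cases h : bi < rules.length
    · simp [List.set_set, List.getD_eq_getElem?_getD, h]
    · simp [List.set_eq_of_length_le (Nat.le_of_not_lt h)]

theorem pv_foldl_append_map {α β : Type} (f : α → β) :
    ∀ (ps : List α) (c : List β),
      ps.foldl (fun cell p => cell ++ [f p]) c = c ++ ps.map f := by
  intro ps
  induction ps with
  | nil => simp
  | cons p ps ih => intro c; simp [ih]

theorem pv_set_append_len {α : Type} (l : List α) (a b : α) :
    (l ++ [a]).set l.length b = l ++ [b] := by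
  induction l with
  | nil => rfl
  | cons x l ih => simp [ih]

theorem pv_getD_append_len {α : Type} (l : List α) (a d : α) :
    (l ++ [a]).getD l.length d = a := by
  simp [List.getD_eq_getElem?_getD]

-- enumerate-driven build loop: if each step appends one element at the running index, the fold is a map
theorem pv_foldl_enumerate_build {α β : Type} (F : α → β)
    (step : List β → (Int × α) → List β)
    (hstep : ∀ acc i x, i = (acc.length : Int) → step acc (i, x) = acc ++ [F x]) :
    ∀ (xs : List α) (s : Nat) (acc : List β), acc.length = s →
      (PySem.List.enumerate xs (s : Int)).foldl step acc = acc ++ xs.map F := by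
  intro xs
  induction xs with
  | nil => intro s acc _; simp [PySem.List.enumerate]
  | cons x xs ih =>
    intro s acc hlen
    rw [PySem.List.enumerate_cons, List.foldl_cons,
        hstep acc s x (by exact_mod_cast hlen.symm)]
    have h1 : ((s : Int) + 1) = ((s + 1 : Nat) : Int) := by push_cast; ring
    rw [h1, ih (s + 1) (acc ++ [F x]) (by simp [hlen])]
    simp

-- proof-side abbreviations for the shapes A's loops take after the bucket-fold lemmas
def pvRow (r : String) : List (List String) :=
  (PySem.List.slice (pySplit r "prop-") (some 1) none).map parseLeaf

def pvG (bucket : List (List (List String))) (rp : Int × String) : List (List (List String)) :=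
  (bucket ++ [[]]).set rp.1.toNat
    (((bucket ++ [[]]).getD rp.1.toNat []) ++ pvRow rp.2)

-- A's innermost loop: repeated set-at-(bi,ri) with one appended leaf each step
theorem pv_inner (bi ri : Nat) (props : List String)
    (rules : List (List (List (List String)))) :
    props.foldl (fun rules p =>
        rules.set bi ((rules.getD bi []).set ri
          (((rules.getD bi []).getD ri []) ++ [parseLeaf p]))) rules
      = rules.set bi ((rules.getD bi []).set ri
          (((rules.getD bi []).getD ri []) ++ props.map parseLeaf)) :=
  (pv_foldl_set_bucket (fun bucket p => bucket.set ri ((bucket.getD ri []) ++ [parseLeaf p])) bi [] props rules).trans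
    ((congrArg (rules.set bi)
        (pv_foldl_set_bucket (fun cell p => cell ++ [parseLeaf p]) ri [] props (rules.getD bi []))).trans
      (congrArg (fun X => rules.set bi ((rules.getD bi []).set ri X))
        (pv_foldl_append_map parseLeaf props ((rules.getD bi []).getD ri []))))

-- one iteration of A's middle loop only rewrites bucket bi, via pvG
theorem pv_midstep (bi : Nat) (rules : List (List (List (List String)))) (rp : Int × String) :
    (PySem.List.slice (pySplit rp.2 "prop-") (some 1) none).foldl
      (fun rules p =>
        rules.set bi ((rules.getD bi []).set rp.1.toNat
          (((rules.getD bi []).getD rp.1.toNat []) ++ [parseLeaf p])))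
      (rules.set bi ((rules.getD bi []) ++ [[]]))
      = rules.set bi (pvG (rules.getD bi []) rp) := by
  rw [pv_inner]
  by_cases h : bi < rules.length
  · have hget : ((rules.set bi ((rules.getD bi []) ++ [[]])).getD bi []) = (rules.getD bi []) ++ [[]] := by
      simp [List.getD_eq_getElem?_getD, h]
    rw [hget, List.set_set]
    simp [pvG, pvRow]
  · have hle := Nat.le_of_not_lt h
    simp [List.set_eq_of_length_le hle]

-- pvG appends one row when the index is the running length
theorem pv_G_append (bucket : List (List (List String))) (i : Int) (r : String)
    (hi : i = (bucket.length : Int)) :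
    pvG bucket (i, r) = bucket ++ [pvRow r] := by
  subst hi
  simp only [pvG, Int.toNat_natCast]
  rw [pv_getD_append_len, pv_set_append_len]
  simp

theorem pv_main (rule_str : String) : str_to_rules rule_str = str_to_rules_alt rule_str := by
  simp only [str_to_rules]
  -- middle loop ⇒ set-at-bucket form, for every bin index
  have hmid : ∀ (bi : Nat) (rstrs : List String) (rules : List (List (List (List String)))),
      (PySem.List.enumerate (PySem.List.slice rstrs (some 1) none)).foldl
        (fun rules rp =>
          (PySem.List.slice (pySplit rp.2 "prop-") (some 1) none).foldl
            (fun rules p =>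
              rules.set bi ((rules.getD bi []).set rp.1.toNat
                (((rules.getD bi []).getD rp.1.toNat []) ++ [parseLeaf p])))
            (rules.set bi ((rules.getD bi []) ++ [[]])))
        rules
      = rules.set bi ((PySem.List.enumerate (PySem.List.slice rstrs (some 1) none)).foldl pvG (rules.getD bi [])) := by
    intro bi rstrs rules
    have hfun : (fun (rules : List (List (List (List String)))) (rp : Int × String) =>
          (PySem.List.slice (pySplit rp.2 "prop-") (some 1) none).foldl
            (fun rules p =>
              rules.set bi ((rules.getD bi []).set rp.1.toNat
                (((rules.getD bi []).getD rp.1.toNat []) ++ [parseLeaf p])))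
            (rules.set bi ((rules.getD bi []) ++ [[]])))
        = (fun (rules : List (List (List (List String)))) (rp : Int × String) =>
            rules.set bi (pvG (rules.getD bi []) rp)) := by
      funext rules rp
      exact pv_midstep bi rules rp
    rw [hfun, pv_foldl_set_bucket pvG bi []]
  -- a bin's bucket is built from [] by appending one row per rule fragment
  have hbucket : ∀ (rstrs : List String),
      ((PySem.List.enumerate (PySem.List.slice rstrs (some 1) none) (((0 : Nat) : Int))).foldl pvG [])
        = (PySem.List.slice rstrs (some 1) none).map pvRow :=
    fun rstrs => pv_foldl_enumerate_build pvRow pvG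
      (fun acc i x hix => pv_G_append acc i x hix)
      (PySem.List.slice rstrs (some 1) none) 0 [] rfl
  -- the outer loop appends one fully-built bin per fragment
  have houter := pv_foldl_enumerate_build
    (fun bstr => (PySem.List.slice (pySplit bstr "rule;") (some 1) none).map pvRow)
    (fun (rules : List (List (List (List String)))) (bp : Int × String) =>
        (PySem.List.enumerate (PySem.List.slice (pySplit bp.2 "rule;") (some 1) none)).foldl
          (fun rules rp =>
            (PySem.List.slice (pySplit rp.2 "prop-") (some 1) none).foldl
              (fun rules p =>
                rules.set bp.1.toNat ((rules.getD bp.1.toNat []).set rp.1.toNat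
                  (((rules.getD bp.1.toNat []).getD rp.1.toNat []) ++ [parseLeaf p])))
              (rules.set bp.1.toNat ((rules.getD bp.1.toNat []) ++ [[]])))
          (rules ++ [[]]))
    (by
      intro acc i x hix
      dsimp only
      rw [hmid i.toNat (pySplit x "rule;") (acc ++ [[]])]
      have hnat : i.toNat = acc.length := by omega
      rw [hnat, pv_getD_append_len]
      rw [show ((0 : Int)) = (((0 : Nat) : Int)) from by norm_num]
      rw [hbucket, pv_set_append_len])
    (PySem.List.slice (pySplit rule_str "bin:") (some 1) none) 0 [] rfl
  simp only [← parseLeaf.eq_def]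
  push_cast at houter
  rw [houter]
  -- both sides are now the same three nested maps
  have hs : ∀ {α : Type} (xs : List α), PySem.List.slice xs (some 1) none = xs.drop 1 := by
    intro α xs
    simpa using PySem.List.slice_from xs (a := 1) (by norm_num)
  simp only [str_to_rules_alt, parseLevel, pvRow, hs, List.nil_append]
  refine List.map_congr_left (fun bstr _ => ?_)
  simp only [parseLevel, pvRow, hs]
  refine List.map_congr_left (fun rstr _ => ?_)
  simp only [parseLevel, pvRow, hs]
-- ===== VERDICT (by name: the statement is the Claim_ definition above) =====
theorem str_to_rules_spec : Claim_equal_str_to_rules := by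
  intro s _
  unfold Spec_str_to_rules
  exact pv_main s
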